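-- pv_equiv track=rewrite | github.com/CoinLQ/TripitakaPlatform | tasks/ocr_compare.py | extract_ocr_separators
-- ===== SOURCE A (Python) =====
-- def extract_ocr_separators(text):
--     """
--     例如，输入为以下字符串：
--     p\n大方廣\n東晉b\n世間淨\n
--        0 1 2  3 4   5 6 7
--     这个函数的作用是把分隔符收集起来。其输出为
--     [
--         (0,"p\n"),
--         (3,"\n"),
--         (5,"b\n"),
--         (8,"\n")
--     ]
--     元组第一个是文本字符下标。分隔符不计入下标的统计
--     """
--     if text == '':
--         return []
--     separators = []
--     pos = 0
--     sep = ''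
--     for c in text:
--         if c in 'pb\n':
--             sep += c
--         else:
--             if sep:
--                 separators.append( (pos, sep) )
--                 sep = ''
--             pos += 1
--     return separators
-- ===== SOURCE B (Python) =====
-- def extract_ocr_separators(text):
--     SEPS = 'pb\n'
--     # phase 1: tokenize into maximal runs of separator / non-separator characters
--     runs = []
--     i = 0
--     n = len(text)
--     while i < n:
--         j = i
--         is_sep = text[i] in SEPS
--         while j < n and (text[j] in SEPS) == is_sep:
--             j += 1
--         runs.append((is_sep, text[i:j]))
--         i = j
--     # phase 2: walk the runs keeping a running non-separator character index;
--     # a separator run is reported only if some run (hence a non-separator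
--     # character) follows it, so a trailing separator run is dropped
--     out = []
--     pos = 0
--     for k, (is_sep, run) in enumerate(runs):
--         if is_sep:
--             if k + 1 < len(runs):
--                 out.append((pos, run))
--         else:
--             pos += len(run)
--     return out
-- ===== Notes on version B (the rewrite author's own statement) =====
-- stated objective: alternative
-- what changed: Replaces A's single char-by-char state machine (accumulating a pending separator string) with a two-phase design: first tokenize the text into maximal separator/non-separator runs, then a simple pass over the runs that emits each separator run unless it is the last run.
import Mathlib
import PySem

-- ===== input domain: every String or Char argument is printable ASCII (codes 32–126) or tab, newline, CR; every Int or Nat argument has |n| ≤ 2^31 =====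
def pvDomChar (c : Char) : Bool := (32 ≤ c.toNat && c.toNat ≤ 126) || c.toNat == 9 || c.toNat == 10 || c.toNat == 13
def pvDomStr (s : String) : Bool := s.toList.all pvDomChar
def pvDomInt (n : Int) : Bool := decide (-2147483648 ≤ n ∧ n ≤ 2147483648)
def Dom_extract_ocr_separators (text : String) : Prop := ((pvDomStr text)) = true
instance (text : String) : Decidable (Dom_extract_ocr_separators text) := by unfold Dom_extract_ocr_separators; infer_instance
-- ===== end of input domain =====

-- B replaces A's char-by-char state machine with tokenize-into-runs + a pass over the runs
-- (objective: alternative decomposition, same O(n) cost; return value only, neither mutates).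

-- ===== PORT A =====
-- `c in 'pb\n'`
def sepA (c : Char) : Bool := c == 'p' || c == 'b' || c == '\n'

-- A's for-loop over the characters; state (pos, sep, separators-accumulator)
def loopA : List Char → Int → List Char → List (Int × String) → List (Int × String)
  | [], _, _, acc => acc
  | c :: cs, pos, sep, acc =>
    if sepA c then loopA cs pos (sep ++ [c]) acc
    else if sep = [] then loopA cs (pos + 1) [] acc
    else loopA cs (pos + 1) [] (acc ++ [(pos, String.mk sep)])

def extract_ocr_separators (text : String) : List (Int × String) :=
  if text = "" then [] else loopA text.toList 0 [] []

-- ===== PORT B =====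
-- `c in SEPS`
def sepB (c : Char) : Bool := c == 'p' || c == 'b' || c == '\n'

-- Source B phase 1: maximal runs of separator / non-separator characters
def runsB : List Char → List (Bool × List Char)
  | [] => []
  | c :: cs =>
    (sepB c, c :: cs.takeWhile (fun x => sepB x == sepB c))
      :: runsB (cs.dropWhile (fun x => sepB x == sepB c))
termination_by cs => cs.length
decreasing_by
  exact Nat.lt_succ_of_le (List.length_dropWhile_le _ _)

-- Source B phase 2: walk the runs; `rest ≠ []` is `k + 1 < len(runs)`
def passB : List (Bool × List Char) → Int → List (Int × String)
  | [], _ => []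
  | (isSep, run) :: rest, pos =>
    if isSep then (if rest ≠ [] then [(pos, String.mk run)] else []) ++ passB rest pos
    else passB rest (pos + (run.length : Int))

def extract_ocr_separators_alt (text : String) : List (Int × String) :=
  passB (runsB text.toList) 0

-- ===== PRECONDITION & SPEC =====
def Spec_extract_ocr_separators (text : String) (out : List (Int × String)) : Prop := out = extract_ocr_separators_alt text
instance (text : String) (out : List (Int × String)) : Decidable (Spec_extract_ocr_separators text out) := by unfold Spec_extract_ocr_separators; infer_instance

-- ===== CLAIM (what is proved, stated in full; the proofs are below) =====
def Claim_equal_extract_ocr_separators : Prop := ∀ (text : String), Dom_extract_ocr_separators text → Spec_extract_ocr_separators text (extract_ocr_separators text)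

-- ===== LEMMAS AND PROOFS =====

-- accumulator-free version of A's loop, for the proof
def fA : List Char → Int → List Char → List (Int × String)
  | [], _, _ => []
  | c :: cs, pos, sep =>
    if sepA c then fA cs pos (sep ++ [c])
    else if sep = [] then fA cs (pos + 1) []
    else (pos, String.mk sep) :: fA cs (pos + 1) []

theorem loopA_eq_fA (cs : List Char) : ∀ (pos : Int) (sep : List Char) (acc : List (Int × String)),
    loopA cs pos sep acc = acc ++ fA cs pos sep := by
  induction cs with
  | nil => intro pos sep acc; simp [loopA, fA]
  | cons c cs ih =>
    intro pos sep acc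
    simp only [loopA, fA]
    split_ifs with h1 h2
    · exact ih ..
    · exact ih ..
    · rw [ih]; simp

-- skipping a run of non-separator characters with empty pending sep
theorem fA_nonsep_run (run : List Char) : ∀ (rest : List Char) (pos : Int),
    (∀ c ∈ run, sepA c = false) → fA (run ++ rest) pos [] = fA rest (pos + (run.length : Int)) [] := by
  induction run with
  | nil => intro rest pos _; simp
  | cons c run ih =>
    intro rest pos h
    have hc : sepA c = false := h c (by simp)
    rw [List.cons_append, fA, if_neg (by simp [hc]), if_pos rfl,
      ih rest (pos + 1) (fun x hx => h x (by simp [hx]))]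
    congr 1
    simp only [List.length_cons]
    push_cast
    ring

-- absorbing a run of separator characters into the pending sep
theorem fA_sep_run (run : List Char) : ∀ (rest : List Char) (pos : Int) (sep : List Char),
    (∀ c ∈ run, sepA c = true) → fA (run ++ rest) pos sep = fA rest pos (sep ++ run) := by
  induction run with
  | nil => intro rest pos sep _; simp
  | cons c run ih =>
    intro rest pos sep h
    have hc : sepA c = true := h c (by simp)
    rw [List.cons_append, fA, if_pos hc, ih rest pos (sep ++ [c]) (fun x hx => h x (by simp [hx]))]
    simp

theorem head_dropWhile_false {p : Char → Bool} {l : List Char} {c : Char} {cs : List Char}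
    (h : l.dropWhile p = c :: cs) : p c = false := by
  induction l with
  | nil => simp [List.dropWhile] at h
  | cons a l ih =>
    rw [List.dropWhile_cons] at h
    by_cases hp : p a
    · exact ih (by simpa [hp] using h)
    · rw [if_neg (by simp [hp])] at h
      cases h
      simpa using hp

theorem fA_eq_passB (n : Nat) : ∀ (cs : List Char), cs.length ≤ n → ∀ (pos : Int),
    fA cs pos [] = passB (runsB cs) pos := by
  induction n with
  | zero =>
    intro cs hlen pos
    have : cs = [] := by cases cs <;> simp_all
    subst this; simp [fA, runsB, passB]
  | succ n ih =>
    intro cs hlen pos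
    match cs with
    | [] => simp [fA, runsB, passB]
    | c :: cs' =>
      obtain ⟨run, hrun⟩ : ∃ r, cs'.takeWhile (fun x => sepB x == sepB c) = r := ⟨_, rfl⟩
      obtain ⟨rest, hrest⟩ : ∃ r, cs'.dropWhile (fun x => sepB x == sepB c) = r := ⟨_, rfl⟩
      have hsplit : run ++ rest = cs' := by
        rw [← hrun, ← hrest]; exact List.takeWhile_append_dropWhile
      have hrestlen : rest.length ≤ n := by
        have hd := List.length_dropWhile_le (fun x => sepB x == sepB c) cs'
        rw [hrest] at hd
        simp at hlen
        omega
      have hmem : ∀ x ∈ run, sepB x = sepB c := by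
        intro x hx
        rw [← hrun] at hx
        have := List.mem_takeWhile_imp hx
        simpa using this
      rw [runsB, hrun, hrest]
      by_cases hc : sepA c = true
      · -- separator branch
        have hcB : sepB c = true := hc
        rw [fA, if_pos hc, List.nil_append, ← hsplit,
          fA_sep_run run rest pos [c]
            (fun x hx => by rw [show sepA x = sepB x from rfl, hmem x hx, hcB])]
        simp only [passB, hcB, List.cons_append, if_true]
        cases rest with
        | nil =>
          simp [fA, runsB, passB]
        | cons c' rest' =>
          have hc' : sepB c' = false := by
            have hh := head_dropWhile_false (p := fun x => sepB x == sepB c) (l := cs') hrest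
            simp [hcB] at hh
            simp [hh]
          have hc'A : sepA c' = false := hc'
          have htokne : runsB (c' :: rest') ≠ [] := by rw [runsB]; simp
          rw [if_pos htokne, ← ih (c' :: rest') hrestlen pos]
          simp [fA, hc'A]
      · -- non-separator branch
        have hcB : sepB c = false := by simpa using hc
        rw [fA, if_neg (by simp [hc]), if_pos rfl, ← hsplit,
          fA_nonsep_run run rest (pos + 1)
            (fun x hx => by rw [show sepA x = sepB x from rfl, hmem x hx, hcB])]
        simp only [passB, hcB, Bool.false_eq_true, if_false]
        rw [ih rest hrestlen]
        congr 1
        simp only [List.length_cons]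
        push_cast
        ring

-- ===== VERDICT (by name: the statement is the Claim_ definition above) =====
theorem extract_ocr_separators_spec : Claim_equal_extract_ocr_separators := by
  intro text _
  unfold Spec_extract_ocr_separators extract_ocr_separators extract_ocr_separators_alt
  by_cases h : text = ""
  · subst h; simp [runsB, passB]
  · rw [if_neg h, loopA_eq_fA, List.nil_append,
      fA_eq_passB text.toList.length text.toList (le_refl _) 0]
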